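-- pv_equiv track=rewrite | github.com/DejanPeric058/AoC2023 | 13b.py | simetrala_na_vrstici
-- ===== SOURCE A (Python) =====
-- def simetrala_na_vrstici(matrix):
--     dol = len(matrix)
--     for x in range(1, dol):
--         oddo = min(x, dol - x)
--         y = matrix[x: x + oddo]
--         y = y[::-1]
--         if matrix[x - oddo: x] == y:
--             return x
--
--     return None
-- ===== SOURCE B (Python) =====
-- def simetrala_na_vrstici(matrix):
--     # One pass maintaining the reversed prefix; compare it pointwise
--     # (short-circuiting) against the remaining suffix at each split.
--     left = []
--     rest = matrix
--     x = 0
--     while rest: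
--         if x > 0 and all(a == b for a, b in zip(left, rest)):
--             return x
--         left = [rest[0]] + left
--         rest = rest[1:]
--         x += 1
--     return None
-- ===== Notes on version B (the rewrite author's own statement) =====
-- stated objective: alternative
-- what changed: Instead of building two slices and a reversal per candidate split, B makes a single walk that maintains the reversed prefix incrementally and compares it pointwise (short-circuiting) against the remaining suffix at each split.
import Mathlib
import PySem

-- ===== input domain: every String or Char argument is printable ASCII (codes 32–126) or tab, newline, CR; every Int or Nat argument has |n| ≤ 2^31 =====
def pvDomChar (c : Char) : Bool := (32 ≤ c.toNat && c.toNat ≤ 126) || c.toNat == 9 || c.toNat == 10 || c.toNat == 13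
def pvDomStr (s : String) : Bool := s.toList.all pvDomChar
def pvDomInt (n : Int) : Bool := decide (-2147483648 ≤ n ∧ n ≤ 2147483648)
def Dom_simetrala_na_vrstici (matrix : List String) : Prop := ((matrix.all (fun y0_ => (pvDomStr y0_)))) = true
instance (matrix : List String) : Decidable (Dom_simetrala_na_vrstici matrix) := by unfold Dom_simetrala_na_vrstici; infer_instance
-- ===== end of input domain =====

-- B replaces A's per-split slicing and reversal by a single walk that maintains the
-- reversed prefix and compares it pointwise (short-circuiting) with the suffix; objective: alternative.

-- ===== PORT A =====
-- the for-loop with early return, over range(1, dol)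
def goA (matrix : List String) (dol : Int) : List Int → Option Int
  | [] => none
  | x :: xs =>
    let oddo := min x (dol - x)
    let y := PySem.List.slice matrix (some x) (some (x + oddo))
    let y := y.reverse   -- y[::-1]; exact: PySem.List.slice?_none_none_neg_one
    if PySem.List.slice matrix (some (x - oddo)) (some x) == y then some x
    else goA matrix dol xs

def simetrala_na_vrstici (matrix : List String) : Option Int :=
  let dol : Int := matrix.length
  goA matrix dol (PySem.List.pyRange 1 dol 1)

-- ===== PORT B =====
-- all(a == b for a, b in zip(left, rest)): pointwise comparison over the common prefix
def prefEq : List String → List String → Bool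
  | a :: as, b :: bs => a == b && prefEq as bs
  | _, _ => true

-- the while-loop: left = reversed prefix, rest = suffix starting at split x
def goB : List String → List String → Int → Option Int
  | _, [], _ => none
  | left, r :: rs, x =>
    if decide (0 < x) && prefEq left (r :: rs) then some x
    else goB (r :: left) rs (x + 1)

def simetrala_na_vrstici_alt (matrix : List String) : Option Int :=
  goB [] matrix 0

-- ===== PRECONDITION & SPEC =====
def Spec_simetrala_na_vrstici (matrix : List String) (out : Option Int) : Prop := out = simetrala_na_vrstici_alt matrix
instance (matrix : List String) (out : Option Int) : Decidable (Spec_simetrala_na_vrstici matrix out) := by unfold Spec_simetrala_na_vrstici; infer_instance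

-- ===== CLAIM (what is proved, stated in full; the proofs are below) =====
def Claim_equal_simetrala_na_vrstici : Prop := ∀ (matrix : List String), Dom_simetrala_na_vrstici matrix → Spec_simetrala_na_vrstici matrix (simetrala_na_vrstici matrix)

-- ===== LEMMAS AND PROOFS =====

-- prefEq is equality of the zipped (common-length) prefixes
lemma prefEq_spec (l r : List String) :
    (prefEq l r = true) ↔ l.take r.length = r.take l.length := by
  induction l generalizing r with
  | nil => cases r <;> simp [prefEq]
  | cons a as ih =>
    cases r with
    | nil => simp [prefEq]
    | cons b bs =>
      simp [prefEq, Bool.and_eq_true, beq_iff_eq, ih]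

-- the two loop conditions agree at split n (1 ≤ n < len)
lemma cond_eq (m : List String) (n : Nat) (h1 : 1 ≤ n) (h2 : n < m.length) :
    (prefEq ((m.take n).reverse) (m.drop n) = true) ↔
    (PySem.List.slice m (some ((n : Int) - min (n : Int) ((m.length : Int) - n))) (some (n : Int))
      = (PySem.List.slice m (some (n : Int)) (some ((n : Int) + min (n : Int) ((m.length : Int) - n)))).reverse) := by
  have hn : n ≤ m.length := le_of_lt h2
  set o : Nat := min n (m.length - n) with ho
  have hcast : min (n : Int) ((m.length : Int) - n) = ((o : Nat) : Int) := by
    simp only [ho]; omega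
  have e1 : (n : Int) - min (n : Int) ((m.length : Int) - n) = ((n - o : Nat) : Int) := by
    simp only [hcast]; omega
  have e2 : (n : Int) + min (n : Int) ((m.length : Int) - n) = ((n + o : Nat) : Int) := by
    simp only [hcast]; omega
  rw [e1, e2, PySem.List.slice_natCast, PySem.List.slice_natCast]
  have eo1 : n - (n - o) = o := by omega
  have eo2 : n + o - n = o := by omega
  rw [eo1, eo2, prefEq_spec]
  have hlen1 : (m.drop n).length = m.length - n := by simp
  have hlen2 : ((m.take n).reverse).length = n := by simp [hn]
  rw [hlen1, hlen2]
  have hrev : (m.take n).reverse.take (m.length - n) = ((m.drop (n - o)).take o).reverse := by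
    rw [List.take_reverse, List.drop_take]
    have e1 : (m.take n).length - (m.length - n) = n - o := by simp; omega
    rw [e1, eo1]
  have hdrop : (m.drop n).take n = (m.drop n).take o := by
    rw [List.take_eq_take_iff, hlen1]; omega
  rw [hrev, hdrop, List.reverse_eq_iff]

-- main invariant: from split n ≥ 1, B's walk equals A's loop over range(n, len)
lemma goB_eq_goA (m : List String) (n : Nat) (h1 : 1 ≤ n) (h2 : n ≤ m.length) :
    goB ((m.take n).reverse) (m.drop n) (n : Int) =
      goA m (m.length : Int) (PySem.List.pyRange (n : Int) (m.length : Int) 1) := by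
  induction hk : m.length - n generalizing n with
  | zero =>
    have hge : n = m.length := by omega
    rw [List.drop_of_length_le (by omega), PySem.List.pyRange_one_eq_nil (by omega)]
    rfl
  | succ k ih =>
    have hlt : n < m.length := by omega
    rw [List.drop_eq_getElem_cons hlt, PySem.List.pyRange_one_cons (by exact_mod_cast hlt)]
    show (if decide (0 < (n : Int)) && prefEq ((m.take n).reverse) (m[n] :: m.drop (n + 1)) then some (n : Int)
          else goB (m[n] :: (m.take n).reverse) (m.drop (n + 1)) ((n : Int) + 1)) = _
    have hpos : decide (0 < (n : Int)) = true := by simp; exact_mod_cast h1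
    rw [hpos, Bool.true_and]
    have hc := cond_eq m n h1 hlt
    rw [List.drop_eq_getElem_cons hlt] at hc
    simp only [goA, beq_iff_eq]
    by_cases hcond : prefEq ((m.take n).reverse) (m[n] :: m.drop (n + 1)) = true
    · rw [hcond, if_pos (hc.mp hcond)]
      rfl
    · rw [Bool.not_eq_true] at hcond
      rw [hcond]
      simp only [Bool.false_eq_true, if_false]
      rw [if_neg (fun h => by rw [hc.mpr h] at hcond; simp at hcond)]
      have hstep : (m.take (n + 1)).reverse = m[n] :: (m.take n).reverse := by
        rw [List.take_succ_eq_append_getElem hlt, List.reverse_append]; rfl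
      have := ih (n + 1) (by omega) (by omega) (by omega)
      rw [hstep] at this
      push_cast at this
      exact this

-- ===== VERDICT (by name: the statement is the Claim_ definition above) =====
theorem simetrala_na_vrstici_spec : Claim_equal_simetrala_na_vrstici := by
  intro m _
  unfold Spec_simetrala_na_vrstici simetrala_na_vrstici simetrala_na_vrstici_alt
  cases m with
  | nil => simp [goB, goA, PySem.List.pyRange_one_eq_nil]
  | cons r rs =>
    have h := goB_eq_goA (r :: rs) 1 le_rfl (by simp)
    simp only [List.take_succ_cons, List.take_zero, List.reverse_cons, List.reverse_nil,
      List.nil_append, List.drop_succ_cons, List.drop_zero, Nat.cast_one] at h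
    rw [show goB [] (r :: rs) 0 = goB [r] rs 1 from rfl, h]
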